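-- pv_equiv track=rewrite | github.com/KosinskiLab/AlphaPulldown | alphapulldown/utils/output_paths.py | _collapse_repeated_name_fragments
-- ===== SOURCE A (Python) =====
-- from typing import Sequence
--
-- def _collapse_repeated_name_fragments(fragments: Sequence[str]) -> list[str]:
--     if not fragments:
--         return []
--
--     collapsed: list[str] = []
--     current_fragment = fragments[0]
--     current_count = 1
--
--     for fragment in fragments[1:]:
--         if fragment == current_fragment:
--             current_count += 1
--             continue
--
--         collapsed.append(
--             current_fragment
--             if current_count == 1
--             else f"{current_fragment}__x{current_count}"
--         )
--         current_fragment = fragment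
--         current_count = 1
--
--     collapsed.append(
--         current_fragment
--         if current_count == 1
--         else f"{current_fragment}__x{current_count}"
--     )
--     return collapsed
-- ===== SOURCE B (Python) =====
-- from typing import Sequence
--
-- def _collapse_repeated_name_fragments(fragments: Sequence[str]) -> list[str]:
--     frags = list(fragments)
--     n = len(frags)
--     # indices where a new run begins: position 0 or differs from predecessor
--     starts = [i for i in range(n) if i == 0 or frags[i] != frags[i - 1]]
--     ends = starts[1:] + [n]
--     return [
--         frags[s] if e - s == 1 else f"{frags[s]}__x{e - s}"
--         for s, e in zip(starts, ends)
--     ]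
-- ===== Notes on version B (the rewrite author's own statement) =====
-- stated objective: alternative
-- what changed: Replaces A's single-pass current_fragment/current_count accumulator state machine with a staged boundary-index computation: first collect the indices where a new run starts (adjacent-inequality test over range(n)), derive each run's end from the next start, and obtain counts by index subtraction e - s.
import Mathlib
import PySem

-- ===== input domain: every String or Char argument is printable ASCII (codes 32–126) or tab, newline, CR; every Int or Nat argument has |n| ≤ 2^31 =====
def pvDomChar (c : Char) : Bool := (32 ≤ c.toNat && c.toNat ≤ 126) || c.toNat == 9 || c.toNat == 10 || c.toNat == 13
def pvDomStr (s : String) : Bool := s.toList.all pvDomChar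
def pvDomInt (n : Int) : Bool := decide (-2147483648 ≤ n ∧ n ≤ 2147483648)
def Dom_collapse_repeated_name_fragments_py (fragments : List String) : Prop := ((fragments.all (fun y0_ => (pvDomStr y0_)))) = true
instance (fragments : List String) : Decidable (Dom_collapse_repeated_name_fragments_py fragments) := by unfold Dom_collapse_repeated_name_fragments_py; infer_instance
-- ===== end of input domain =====

-- B replaces A's current_fragment/current_count state machine by a staged boundary-index
-- computation (run-start indices, counts by index subtraction); alternative decomposition, same cost.

-- ===== PORT A =====
-- the for-loop over fragments[1:] with state (collapsed, current_fragment, current_count),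
-- including the final append after the loop
def collapseA_go (rest : List String) (collapsed : List String)
    (current : String) (count : Int) : List String :=
  match rest with
  | [] => collapsed ++ [if count == 1 then current else current ++ "__x" ++ PySem.Int.toStr count]
  | fragment :: rest' =>
    if fragment == current then
      collapseA_go rest' collapsed current (count + 1)
    else
      collapseA_go rest'
        (collapsed ++ [if count == 1 then current else current ++ "__x" ++ PySem.Int.toStr count])
        fragment 1

def collapse_repeated_name_fragments_py (fragments : List String) : List String :=
  match fragments with
  | [] => []
  | first :: rest => collapseA_go rest [] first 1

-- ===== PORT B =====
-- starts = [i for i in range(n) if i == 0 or frags[i] != frags[i-1]]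
-- (every index used is provably in range, so Python's list indexing is ported as getD)
def startsB (l : List String) : List Nat :=
  (List.range l.length).filter (fun i => decide (i = 0) || l.getD i "" != l.getD (i - 1) "")

def collapse_repeated_name_fragments_py_alt (fragments : List String) : List String :=
  let n := fragments.length
  let starts := startsB fragments
  let ends := starts.drop 1 ++ [n]
  (starts.zip ends).map (fun p =>
    if p.2 - p.1 == 1 then fragments.getD p.1 ""
    else fragments.getD p.1 "" ++ "__x" ++ PySem.Int.toStr ((p.2 : Int) - (p.1 : Int)))

-- ===== PRECONDITION & SPEC =====
def Spec_collapse_repeated_name_fragments_py (fragments : List String) (out : List String) : Prop := out = collapse_repeated_name_fragments_py_alt fragments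
instance (fragments : List String) (out : List String) : Decidable (Spec_collapse_repeated_name_fragments_py fragments out) := by unfold Spec_collapse_repeated_name_fragments_py; infer_instance

-- ===== CLAIM (what is proved, stated in full; the proofs are below) =====
def Claim_equal_collapse_repeated_name_fragments_py : Prop := ∀ (fragments : List String), Dom_collapse_repeated_name_fragments_py fragments → Spec_collapse_repeated_name_fragments_py fragments (collapse_repeated_name_fragments_py fragments)

-- ===== LEMMAS AND PROOFS =====

-- proof-side run decomposition: (extra count of leading `key`s, remainder)
def takeRun (key : String) : List String → Nat × List String
  | [] => (0, [])
  | x :: xs =>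
    if x == key then
      let (n, r) := takeRun key xs
      (n + 1, r)
    else (0, x :: xs)

theorem takeRun_len (key : String) (xs : List String) :
    (takeRun key xs).2.length ≤ xs.length := by
  induction xs with
  | nil => simp [takeRun]
  | cons x xs ih =>
    simp only [takeRun]
    split
    · simpa using Nat.le_succ_of_le ih
    · simp

def groups : List String → List (String × Nat)
  | [] => []
  | f :: rest =>
    (f, (takeRun f rest).1 + 1) :: groups (takeRun f rest).2
termination_by xs => xs.length
decreasing_by
  exact Nat.lt_succ_of_le (takeRun_len f rest)

def fmtN (p : String × Nat) : String :=
  if p.2 == 1 then p.1 else p.1 ++ "__x" ++ PySem.Int.toStr (p.2 : Int)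

theorem groups_nil : groups [] = [] := by rw [groups]

theorem groups_cons (f : String) (rest : List String) :
    groups (f :: rest) = (f, (takeRun f rest).1 + 1) :: groups (takeRun f rest).2 := by
  rw [groups]

theorem takeRun_replicate (key : String) (xs : List String) :
    xs = List.replicate (takeRun key xs).1 key ++ (takeRun key xs).2 := by
  induction xs with
  | nil => simp [takeRun]
  | cons x xs ih =>
    simp only [takeRun]
    by_cases h : x == key
    · have hx : x = key := eq_of_beq h
      simp only [h, if_pos]
      conv_lhs => rw [hx, ih]
      simp [List.replicate_succ]
    · simp [h]

theorem takeRun_length (key : String) (xs : List String) :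
    (takeRun key xs).1 + (takeRun key xs).2.length = xs.length := by
  conv_rhs => rw [takeRun_replicate key xs]
  simp


-- recursive characterisation of the run-start indices, with an offset
def startsAux : String → List String → Nat → List Nat
  | _, [], _ => []
  | prev, x :: xs, off =>
    if x != prev then off :: startsAux x xs (off + 1) else startsAux x xs (off + 1)

theorem startsAux_shift (prev : String) (xs : List String) (off m : Nat) :
    startsAux prev xs (off + m) = (startsAux prev xs off).map (· + m) := by
  induction xs generalizing prev off with
  | nil => simp [startsAux]
  | cons x xs ih =>
    simp only [startsAux]
    have h1 : off + m + 1 = (off + 1) + m := by omega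
    by_cases h : x != prev
    · simp [h, h1, ih x (off + 1)]
    · simp [h, h1, ih x (off + 1)]

theorem filter_range_eq_startsAux (prev : String) (xs : List String) :
    (List.range xs.length).filter
        (fun i => xs.getD i "" != (prev :: xs).getD i "") = startsAux prev xs 0 := by
  induction xs generalizing prev with
  | nil => simp [startsAux]
  | cons x xs ih =>
    rw [List.length_cons, List.range_succ_eq_map, List.filter_cons]
    have hmap : ((List.range xs.length).map Nat.succ).filter
          (fun i => (x :: xs).getD i "" != (prev :: x :: xs).getD i "")
        = ((List.range xs.length).filter
            (fun i => xs.getD i "" != (x :: xs).getD i "")).map Nat.succ := by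
      rw [List.filter_map]; rfl
    rw [hmap, ih x]
    have hsucc : (startsAux x xs 0).map Nat.succ = startsAux x xs 1 := by
      have := startsAux_shift x xs 0 1
      simpa using this.symm
    rw [hsucc]
    by_cases h : x != prev
    · simp [h, startsAux]
    · simp [h, startsAux]

theorem startsB_nil : startsB [] = [] := by simp [startsB]

theorem startsB_cons (f : String) (rest : List String) :
    startsB (f :: rest) = 0 :: startsAux f rest 1 := by
  unfold startsB
  rw [List.length_cons, List.range_succ_eq_map, List.filter_cons]
  have hmap : ((List.range rest.length).map Nat.succ).filter
        (fun i => decide (i = 0) || (f :: rest).getD i "" != (f :: rest).getD (i - 1) "")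
      = ((List.range rest.length).filter
          (fun i => rest.getD i "" != (f :: rest).getD i "")).map Nat.succ := by
    rw [List.filter_map]; rfl
  rw [hmap, filter_range_eq_startsAux f rest]
  have hsucc : (startsAux f rest 0).map Nat.succ = startsAux f rest 1 := by
    have := startsAux_shift f rest 0 1
    simpa using this.symm
  rw [hsucc]
  simp

theorem startsAux_run (key : String) (rest : List String) (off : Nat) :
    startsAux key rest off =
      (match (takeRun key rest).2 with
       | [] => []
       | g :: gs => (off + (takeRun key rest).1) :: startsAux g gs (off + (takeRun key rest).1 + 1)) := by
  induction rest generalizing key off with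
  | nil => simp [startsAux, takeRun]
  | cons x xs ih =>
    simp only [startsAux, takeRun]
    by_cases h : x == key
    · have hx : x = key := eq_of_beq h
      have hne : (x != key) = false := by simp [hx]
      simp only [h, if_pos, hne, Bool.false_eq_true, if_neg, not_false_iff]
      rw [ih x (off + 1)]
      subst hx
      rcases hg : (takeRun x xs).2 with _ | ⟨g, gs⟩
      · simp
      · have h1 : off + 1 + (takeRun x xs).1 = off + ((takeRun x xs).1 + 1) := by
          omega
        rw [h1]
    · have hne : (x != key) = true := by simp [bne, h]
      simp [h, hne]

theorem startsB_run (f : String) (rest : List String) :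
    startsB (f :: rest) =
      0 :: (startsB (takeRun f rest).2).map (· + ((takeRun f rest).1 + 1)) := by
  rw [startsB_cons, startsAux_run f rest 1]
  rcases hg : (takeRun f rest).2 with _ | ⟨g, gs⟩
  · simp [startsB_nil]
  · rw [startsB_cons g gs]
    simp only [List.map_cons]
    rw [show (1 + (takeRun f rest).1) = 0 + ((takeRun f rest).1 + 1) from by omega,
        show (0 + ((takeRun f rest).1 + 1) + 1) = 1 + ((takeRun f rest).1 + 1) from by omega,
        startsAux_shift g gs 1 ((takeRun f rest).1 + 1)]

theorem getD_shift (f : String) (rest : List String) (s : Nat) :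
    (f :: rest).getD (s + ((takeRun f rest).1 + 1)) "" = (takeRun f rest).2.getD s "" := by
  have hrepl : f :: rest
      = List.replicate ((takeRun f rest).1 + 1) f ++ (takeRun f rest).2 := by
    conv_lhs => rw [takeRun_replicate f rest]
    simp [List.replicate_succ]
  rw [hrepl]
  rw [List.getD_eq_getElem?_getD, List.getElem?_append_right (by simp)]
  simp [List.getD_eq_getElem?_getD]

theorem head_fmt (f : String) (rest : List String) (k : Nat) :
    (if (k + 1) - 0 == 1 then (f :: rest).getD 0 ""
     else (f :: rest).getD 0 "" ++ "__x" ++ PySem.Int.toStr (((k + 1 : Nat) : Int) - ((0 : Nat) : Int)))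
      = fmtN (f, k + 1) := by
  by_cases h1 : k = 0
  · simp [h1, fmtN]
  · have hb : ((k + 1) - 0 == 1) = false := by simp; omega
    have hb2 : ((k + 1 : Nat) == 1) = false := by simp; omega
    simp [fmtN, hb2]

theorem alt_step (f : String) (rest : List String) :
    collapse_repeated_name_fragments_py_alt (f :: rest) =
      fmtN (f, (takeRun f rest).1 + 1)
        :: collapse_repeated_name_fragments_py_alt (takeRun f rest).2 := by
  set k := (takeRun f rest).1 with hk
  set r := (takeRun f rest).2 with hr
  have hlen : (f :: rest).length = r.length + (k + 1) := by
    have hL := takeRun_length f rest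
    rw [← hk, ← hr] at hL
    simp only [List.length_cons]
    omega
  unfold collapse_repeated_name_fragments_py_alt
  simp only
  rw [startsB_run f rest, ← hk, ← hr, hlen]
  rcases hcase : startsB r with _ | ⟨a, T⟩
  · -- startsB r = [] forces r = []
    have hrnil : r = [] := by
      rcases hr2 : r with _ | ⟨g, gs⟩
      · rfl
      · rw [hr2, startsB_cons] at hcase; cases hcase
    rw [hrnil]
    simp only [List.map_nil, List.drop_succ_cons, List.drop_nil,
      List.nil_append, List.zip_cons_cons, List.zip_nil_right, List.map_cons,
      List.map_nil, List.length_nil, Nat.zero_add]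
    exact congrArg (· :: []) (head_fmt f rest k)
  · have ha : a = 0 := by
      rcases hr2 : r with _ | ⟨g, gs⟩
      · rw [hr2, startsB_nil] at hcase; cases hcase
      · rw [hr2, startsB_cons] at hcase
        injection hcase with h1 _
        exact h1.symm
    subst ha
    -- second components: drop 1 and the appended length, as maps by (· + (k+1))
    have happ : (T.map (· + (k + 1))) ++ [r.length + (k + 1)]
        = (T ++ [r.length]).map (· + (k + 1)) := by simp
    simp only [List.map_cons, List.drop_succ_cons, List.drop_zero, List.cons_append,
      List.zip_cons_cons, List.map_cons, Nat.zero_add]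
    rw [happ]
    rw [show ((k + 1) :: List.map (fun x => x + (k + 1)) T : List Nat)
          = List.map (fun x => x + (k + 1)) (0 :: T) by simp]
    rw [List.zip_map, List.map_map, head_fmt f rest k]
    congr 1
    apply List.map_congr_left
    intro p _
    obtain ⟨s, e⟩ := p
    have hget := getD_shift f rest s
    rw [← hk, ← hr] at hget
    simp only [Function.comp_apply, Prod.map]
    have hsub : (e + (k + 1)) - (s + (k + 1)) = e - s := by omega
    rw [hsub, hget]
    by_cases hone : ((e - s : Nat) == 1)
    · simp [hone]
    · simp only [hone, Bool.false_eq_true, if_neg, not_false_iff]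
      congr 2
      push_cast
      ring

theorem alt_eq_groups (l : List String) :
    collapse_repeated_name_fragments_py_alt l = (groups l).map fmtN := by
  match l with
  | [] =>
    simp [collapse_repeated_name_fragments_py_alt, startsB_nil, groups_nil]
  | f :: rest =>
    rw [alt_step, groups_cons, List.map_cons]
    congr 1
    exact alt_eq_groups (takeRun f rest).2
termination_by l.length
decreasing_by
  exact Nat.lt_succ_of_le (takeRun_len f rest)

theorem ifInt_eq_fmtN (current : String) (c : Nat) :
    (if ((c : Int) == 1) then current else current ++ "__x" ++ PySem.Int.toStr (c : Int))
      = fmtN (current, c) := by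
  by_cases h : c = 1
  · simp [h, fmtN]
  · have h1 : ((c : Int) == 1) = false := by
      simp only [beq_eq_false_iff_ne, ne_eq]
      exact_mod_cast h
    have h2 : (c == 1) = false := by simp [h]
    simp [fmtN, h1, h2]

theorem collapseA_go_eq (rest : List String) :
    ∀ (collapsed : List String) (current : String) (c : Nat),
    collapseA_go rest collapsed current (c : Int) =
      collapsed ++ fmtN (current, c + (takeRun current rest).1)
        :: ((groups (takeRun current rest).2).map fmtN) := by
  induction rest with
  | nil =>
    intro collapsed current c
    simp only [collapseA_go, takeRun, groups_nil, List.map_nil]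
    rw [ifInt_eq_fmtN]
    simp
  | cons fragment rest' ih =>
    intro collapsed current c
    simp only [collapseA_go, takeRun]
    by_cases h : fragment == current
    · simp only [h, if_pos]
      have hc : (c : Int) + 1 = ((c + 1 : Nat) : Int) := by push_cast; ring
      rw [hc, ih collapsed current (c + 1)]
      have hfc : fragment = current := eq_of_beq h
      subst hfc
      have hadd : c + 1 + (takeRun fragment rest').1
          = c + ((takeRun fragment rest').1 + 1) := by omega
      rw [hadd]
    · simp only [h, Bool.false_eq_true, if_neg, not_false_iff]
      rw [ifInt_eq_fmtN]
      have hih := ih (collapsed ++ [fmtN (current, c)]) fragment 1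
      norm_num at hih
      rw [hih, groups_cons]
      simp [Nat.add_comm]

-- ===== VERDICT (by name: the statement is the Claim_ definition above) =====
theorem collapse_repeated_name_fragments_py_spec : Claim_equal_collapse_repeated_name_fragments_py := by
  intro fragments _
  unfold Spec_collapse_repeated_name_fragments_py
  rcases fragments with _ | ⟨first, rest⟩
  · simp [collapse_repeated_name_fragments_py, collapse_repeated_name_fragments_py_alt,
      startsB_nil]
  · simp only [collapse_repeated_name_fragments_py]
    have h1 : (1 : Int) = ((1 : Nat) : Int) := by norm_num
    rw [h1, collapseA_go_eq rest [] first 1, alt_eq_groups, groups_cons, List.map_cons]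
    simp [Nat.add_comm]
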